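-- pv_equiv track=rewrite | github.com/Darukity/tdd-exam | holdem.py | _find_two_pair_cards
-- ===== SOURCE A (Python) =====
-- from typing import Sequence
--
-- Card = str
--
-- RANK_TO_VALUE = {
--     "2": 2,
--     "3": 3,
--     "4": 4,
--     "5": 5,
--     "6": 6,
--     "7": 7,
--     "8": 8,
--     "9": 9,
--     "T": 10,
--     "J": 11,
--     "Q": 12,
--     "K": 13,
--     "A": 14,
-- }
--
-- def _card_rank_value(card: Card) -> int:
--     return RANK_TO_VALUE[card[0]]
--
-- def _as_chosen5(cards: Sequence[Card]) -> tuple[Card, Card, Card, Card, Card]: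
--     return (cards[0], cards[1], cards[2], cards[3], cards[4])
--
-- def _group_cards_by_rank(cards: Sequence[Card]) -> dict[int, list[Card]]:
--     cards_by_rank: dict[int, list[Card]] = {}
--     for card in cards:
--         rank = _card_rank_value(card)
--         cards_by_rank.setdefault(rank, []).append(card)
--     return cards_by_rank
--
-- def _find_two_pair_cards(cards: Sequence[Card]) -> tuple[Card, Card, Card, Card, Card] | None:
--     cards_by_rank = _group_cards_by_rank(cards)
--
--     pair_ranks = sorted([rank for rank, rank_cards in cards_by_rank.items() if len(rank_cards) >= 2], reverse=True)
--     if len(pair_ranks) < 2: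
--         return None
--
--     high_pair_rank = pair_ranks[0]
--     low_pair_rank = pair_ranks[1]
--     high_pair_cards = cards_by_rank[high_pair_rank][:2]
--     low_pair_cards = cards_by_rank[low_pair_rank][:2]
--
--     kickers = sorted(
--         [card for card in cards if _card_rank_value(card) not in {high_pair_rank, low_pair_rank}],
--         key=_card_rank_value,
--         reverse=True,
--     )
--
--     return _as_chosen5([high_pair_cards[0], high_pair_cards[1], low_pair_cards[0], low_pair_cards[1], kickers[0]])
-- ===== SOURCE B (Python) =====
-- # B: no grouping dict-of-lists and no sorting: one counting pass, a running top-two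
-- # scan over the rank counts, then a single pass over the hand collecting the first
-- # two cards of each chosen rank and the best kicker (first card of maximal rank).
-- RANK_TO_VALUE = {
--     "2": 2, "3": 3, "4": 4, "5": 5, "6": 6, "7": 7, "8": 8, "9": 9,
--     "T": 10, "J": 11, "Q": 12, "K": 13, "A": 14,
-- }
--
-- def _find_two_pair_cards(cards):
--     counts = {}
--     for card in cards:
--         r = RANK_TO_VALUE[card[0]]
--         counts[r] = counts.get(r, 0) + 1
--
--     hi = lo = None
--     for r, n in counts.items():
--         if n >= 2:
--             if hi is None or r > hi:
--                 hi, lo = r, hi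
--             elif lo is None or r > lo:
--                 lo = r
--     if lo is None:
--         return None
--
--     h1 = h2 = l1 = l2 = kick = None
--     for card in cards:
--         r = RANK_TO_VALUE[card[0]]
--         if r == hi:
--             if h1 is None:
--                 h1 = card
--             elif h2 is None:
--                 h2 = card
--         elif r == lo:
--             if l1 is None:
--                 l1 = card
--             elif l2 is None:
--                 l2 = card
--         elif kick is None or r > RANK_TO_VALUE[kick[0]]:
--             kick = card
--     if kick is None:
--         # two pairs but no fifth card of another rank: no five-card hand exists
--         return None
--     return (h1, h2, l1, l2, kick)
-- ===== Notes on version B (the rewrite author's own statement) =====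
-- stated objective: alternative
-- what changed: Replaces A's dict-of-card-lists grouping plus two sorted() calls by a rank-counting pass, a running top-two scan over the counts, and one collecting pass that picks the first two cards of each chosen rank and the running-maximum kicker (no sorting, no grouping lists).
import Mathlib
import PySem

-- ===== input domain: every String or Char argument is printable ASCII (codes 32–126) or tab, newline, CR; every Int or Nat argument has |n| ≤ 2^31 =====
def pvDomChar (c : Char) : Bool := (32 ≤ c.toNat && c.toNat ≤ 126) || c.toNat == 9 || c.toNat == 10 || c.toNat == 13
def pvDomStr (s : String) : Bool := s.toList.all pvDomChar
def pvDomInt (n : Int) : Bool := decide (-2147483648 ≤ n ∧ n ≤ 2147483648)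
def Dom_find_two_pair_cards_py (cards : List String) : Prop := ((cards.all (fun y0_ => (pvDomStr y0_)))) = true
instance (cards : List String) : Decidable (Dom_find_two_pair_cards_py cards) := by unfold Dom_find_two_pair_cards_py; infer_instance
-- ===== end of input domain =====

-- B replaces A's dict-of-lists grouping plus two sorts by a counting pass, a running
-- top-two scan over the counts and one collecting pass (no sorting); objective: alternative.

-- RANK_TO_VALUE[card[0]]; on a card where Python raises (empty string / unknown rank,
-- both excluded by Pre_) this total helper returns 0.
def pvRankVal (c : String) : Int :=
  match c.toList with
  | '2' :: _ => 2 | '3' :: _ => 3 | '4' :: _ => 4 | '5' :: _ => 5 | '6' :: _ => 6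
  | '7' :: _ => 7 | '8' :: _ => 8 | '9' :: _ => 9 | 'T' :: _ => 10 | 'J' :: _ => 11
  | 'Q' :: _ => 12 | 'K' :: _ => 13 | 'A' :: _ => 14
  | _ => 0

-- ===== PORT A =====
def find_two_pair_cards_py (cards : List String) : Option (String × String × String × String × String) :=
  let cardsByRank := cards.foldl (fun d c => d.modify (pvRankVal c) [] (fun v => v ++ [c])) PySem.Dict.empty
  let pairRanks := PySem.List.sorted ((cardsByRank.items.filter (fun p => decide (2 ≤ p.2.length))).map (fun p => p.1)) (fun x => x) true
  match pairRanks with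
  | hi :: lo :: _ =>
    let highPairCards := (cardsByRank.getD hi []).take 2
    let lowPairCards := (cardsByRank.getD lo []).take 2
    let kickers := PySem.List.sorted (cards.filter (fun c => !(pvRankVal c == hi || pvRankVal c == lo))) pvRankVal true
    match highPairCards, lowPairCards, kickers with
    | h1 :: h2 :: _, l1 :: l2 :: _, k :: _ => some (h1, h2, l1, l2, k)
    | _, _, _ => none
  | _ => none

-- ===== PORT B =====
-- 'if h1 is None: h1 = card elif h2 is None: h2 = card'
def pvFill2 (p : Option String × Option String) (c : String) : Option String × Option String :=
  match p with
  | (none, x) => (some c, x)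
  | (some a, none) => (some a, some c)
  | (some a, some b) => (some a, some b)

-- 'if hi is None or r > hi: hi, lo = r, hi elif lo is None or r > lo: lo = r'
def pvTop2 (p : Option Int × Option Int) (r : Int) : Option Int × Option Int :=
  match p.1 with
  | none => (some r, none)
  | some h =>
    if h < r then (some r, p.1)
    else match p.2 with
      | none => (p.1, some r)
      | some l => if l < r then (p.1, some r) else p

def find_two_pair_cards_py_alt (cards : List String) : Option (String × String × String × String × String) :=
  let counts := cards.foldl (fun d c => d.modify (pvRankVal c) 0 (fun n => n + 1)) (PySem.Dict.empty : PySem.Dict Int Int)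
  let hl := counts.items.foldl (fun p rn => if 2 ≤ rn.2 then pvTop2 p rn.1 else p) (none, none)
  match hl with
  | (some hi, some lo) =>
    let s := cards.foldl (fun s c =>
        let r := pvRankVal c
        if r == hi then (pvFill2 s.1 c, s.2.1, s.2.2)
        else if r == lo then (s.1, pvFill2 s.2.1 c, s.2.2)
        else match s.2.2 with
          | none => (s.1, s.2.1, some c)
          | some k => if pvRankVal k < r then (s.1, s.2.1, some c) else (s.1, s.2.1, some k))
      (((none, none), (none, none), none) : (Option String × Option String) × (Option String × Option String) × Option String)
    match s with
    | ((some h1, some h2), (some l1, some l2), some k) => some (h1, h2, l1, l2, k)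
    | _ => none
  | _ => none

-- ===== PRECONDITION & SPEC =====
-- card[0] exists and is a key of RANK_TO_VALUE
def pvValidCard (c : String) : Bool :=
  match c.toList with
  | [] => false
  | ch :: _ => ['2','3','4','5','6','7','8','9','T','J','Q','K','A'].contains ch

-- Pre_ excludes exactly the inputs where A raises: a card with no / an unknown rank
-- character (KeyError / IndexError in _card_rank_value), and hands whose cards span
-- exactly two ranks, each appearing at least twice (two pairs but no kicker: kickers[0]
-- raises IndexError).
def Pre_find_two_pair_cards_py (cards : List String) : Prop :=
  (∀ c ∈ cards, pvValidCard c = true) ∧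
  ¬((PySem.List.dedup (cards.map pvRankVal)).length = 2 ∧
     ∀ r ∈ PySem.List.dedup (cards.map pvRankVal), 2 ≤ (cards.map pvRankVal).count r)
instance (cards : List String) : Decidable (Pre_find_two_pair_cards_py cards) := by
  unfold Pre_find_two_pair_cards_py; infer_instance

def pvWitness_find_two_pair_cards_py : List String := ["2H", "2D", "3H", "3D", "9S"]

def Spec_find_two_pair_cards_py (cards : List String) (out : Option (String × String × String × String × String)) : Prop :=
  out = find_two_pair_cards_py_alt cards
instance (cards : List String) (out : Option (String × String × String × String × String)) : Decidable (Spec_find_two_pair_cards_py cards out) := by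
  unfold Spec_find_two_pair_cards_py; infer_instance

-- ===== CLAIM (what is proved, stated in full; the proofs are below) =====
def Claim_equal_find_two_pair_cards_py : Prop :=
  ∀ (cards : List String), Dom_find_two_pair_cards_py cards → Pre_find_two_pair_cards_py cards →
    Spec_find_two_pair_cards_py cards (find_two_pair_cards_py cards)

-- ===== LEMMAS AND PROOFS =====
def pvFilt (cards : List String) (r : Int) : List String := cards.filter (fun c => pvRankVal c == r)
def pvCnt (cards : List String) (r : Int) : Nat := (cards.map pvRankVal).count r
def pvR (cards : List String) : List Int := PySem.List.dedup (cards.map pvRankVal)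
def pvK (cards : List String) : List Int := (pvR cards).filter (fun k => decide (2 ≤ pvCnt cards k))

theorem pv_groupD (cards : List String) (r : Int) :
    (cards.foldl (fun d c => d.modify (pvRankVal c) [] (fun v => v ++ [c])) PySem.Dict.empty).getD r []
      = pvFilt cards r :=
  calc (cards.foldl (fun d c => d.modify (pvRankVal c) [] (fun v => v ++ [c])) PySem.Dict.empty).getD r []
      = ((cards.map (fun c => (pvRankVal c, c))).foldl (fun d p => d.modify p.1 [] (fun v => v ++ [p.2])) PySem.Dict.empty).getD r [] := by
        rw [List.foldl_map]
    _ = pvFilt cards r := by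
        rw [PySem.Dict.getD_foldl_modify_append]
        simp [pvFilt, List.filter_map, Function.comp_def]

theorem pv_countD (cards : List String) (r : Int) :
    (cards.foldl (fun d c => d.modify (pvRankVal c) 0 (fun n => n + 1)) (PySem.Dict.empty : PySem.Dict Int Int)).getD r 0
      = (pvCnt cards r : Int) :=
  calc (cards.foldl (fun d c => d.modify (pvRankVal c) 0 (fun n => n + 1)) (PySem.Dict.empty : PySem.Dict Int Int)).getD r 0
      = ((cards.map pvRankVal).foldl (fun d x => d.modify x 0 (fun n => n + 1)) (PySem.Dict.empty : PySem.Dict Int Int)).getD r 0 := by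
        rw [List.foldl_map]
    _ = (pvCnt cards r : Int) := by
        rw [PySem.Dict.getD_foldl_modify_add_one]
        simp [pvCnt]

theorem pv_lenFilt (cards : List String) (r : Int) : (pvFilt cards r).length = pvCnt cards r := by
  simp [pvFilt, pvCnt, List.count_eq_countP, List.countP_eq_length_filter, List.filter_map,
    Function.comp_def]

theorem pv_keysGroup (cards : List String) :
    (cards.foldl (fun d c => d.modify (pvRankVal c) [] (fun v => v ++ [c])) PySem.Dict.empty).keys
      = pvR cards := by
  rw [PySem.Dict.keys_foldl_modify_key cards pvRankVal [] (fun _ c => (fun v => v ++ [c]))]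
  simp [pvR]; rfl

theorem pv_keysCount (cards : List String) :
    (cards.foldl (fun d c => d.modify (pvRankVal c) 0 (fun n => n + 1)) (PySem.Dict.empty : PySem.Dict Int Int)).keys
      = pvR cards := by
  rw [PySem.Dict.keys_foldl_modify_key cards pvRankVal 0 (fun _ _ => (fun n => n + 1))]
  simp [pvR]; rfl

theorem pv_nodupR (cards : List String) : (pvR cards).Nodup := PySem.List.nodup_dedup _

def pvKickStep (k : Option String) (c : String) : Option String :=
  match k with
  | none => some c
  | some k0 => if pvRankVal k0 < pvRankVal c then some c else some k0

theorem pvTop2_comm (p : Option Int × Option Int) (x y : Int) :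
    pvTop2 (pvTop2 p x) y = pvTop2 (pvTop2 p y) x := by
  rcases p with ⟨_ | h, _ | l⟩ <;>
    simp only [pvTop2] <;> split_ifs <;> simp_all <;>
    first
    | omega
    | (split_ifs <;> simp_all <;> omega)

theorem pvTop2_stay (l : List Int) (a b : Int) (hba : b ≤ a) (h : ∀ x ∈ l, x ≤ b) :
    l.foldl pvTop2 (some a, some b) = (some a, some b) := by
  induction l with
  | nil => rfl
  | cons x t ih =>
    have hx := h x (by simp)
    have : pvTop2 (some a, some b) x = (some a, some b) := by
      simp only [pvTop2]
      rw [if_neg (by omega), if_neg (by omega)]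
    rw [List.foldl_cons, this]
    exact ih (fun y hy => h y (by simp [hy]))

theorem pvTop2_pair (a b : Int) (rest : List Int) (hs : (a :: b :: rest).Pairwise (fun x y => y ≤ x)) :
    (a :: b :: rest).foldl pvTop2 (none, none) = (some a, some b) := by
  have hba : b ≤ a := (List.pairwise_cons.mp hs).1 b (by simp)
  have hrest : ∀ x ∈ rest, x ≤ b := fun x hx =>
    (List.pairwise_cons.mp (List.pairwise_cons.mp hs).2).1 x hx
  simp only [List.foldl_cons]
  have e1 : pvTop2 (none, none) a = (some a, none) := rfl
  have e2 : pvTop2 (some a, none) b = (some a, some b) := by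
    simp only [pvTop2]; rw [if_neg (by omega)]
  rw [e1, e2, pvTop2_stay rest a b hba hrest]

theorem pv_top2_perm (K : List Int) :
    K.foldl pvTop2 (none, none) = (PySem.List.sorted K (fun x => x) true).foldl pvTop2 (none, none) := by
  exact (@List.Perm.foldl_eq _ _ pvTop2 _ _ ⟨pvTop2_comm⟩
    (PySem.List.sorted_perm K (fun x => x) true) (none, none)).symm

theorem pvFill2_full (l : List String) (a b : String) :
    l.foldl pvFill2 (some a, some b) = (some a, some b) := by
  induction l with
  | nil => rfl
  | cons x t ih => simpa [pvFill2] using ih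

theorem pvFill2_two (c1 c2 : String) (t : List String) :
    (c1 :: c2 :: t).foldl pvFill2 (none, none) = (some c1, some c2) := by
  simp only [List.foldl_cons]
  exact pvFill2_full t c1 c2

theorem pv_insertBy_head (y : String) (m : List String) :
    (PySem.List.insertBy (fun a b => decide (pvRankVal b < pvRankVal a)) y m).head? =
      some (match m with
            | [] => y
            | a :: _ => if pvRankVal a < pvRankVal y then y else a) := by
  cases m with
  | nil => rfl
  | cons a rest =>
    by_cases h : pvRankVal a < pvRankVal y <;> simp [PySem.List.insertBy, h]

theorem pv_sortedHead (l : List String) :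
    (PySem.List.sorted l pvRankVal true).head? = l.foldl pvKickStep none := by
  induction l using List.reverseRecOn with
  | nil => rfl
  | append_singleton t y ih =>
    rw [PySem.List.sorted_rev_eq_foldl_insertBy, List.foldl_append, List.foldl_append]
    simp only [List.foldl_cons, List.foldl_nil]
    rw [← PySem.List.sorted_rev_eq_foldl_insertBy, pv_insertBy_head, ← ih]
    cases hs : PySem.List.sorted t pvRankVal true with
    | nil => simp [pvKickStep]
    | cons a rest =>
      simp only [pvKickStep, List.head?]
      split_ifs <;> rfl

theorem pv_itemsGroup (cards : List String) :
    (cards.foldl (fun d c => d.modify (pvRankVal c) [] (fun v => v ++ [c])) PySem.Dict.empty).items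
      = (pvR cards).map (fun k => (k, pvFilt cards k)) := by
  have hk := pv_keysGroup cards
  have hnd : (cards.foldl (fun d c => d.modify (pvRankVal c) [] (fun v => v ++ [c])) PySem.Dict.empty).keys.Nodup := by
    rw [hk]; exact pv_nodupR cards
  rw [PySem.Dict.items_eq_map_keys _ hnd [], hk]
  exact List.map_congr_left (fun k _ => by rw [pv_groupD])

theorem pv_itemsCount (cards : List String) :
    (cards.foldl (fun d c => d.modify (pvRankVal c) 0 (fun n => n + 1)) (PySem.Dict.empty : PySem.Dict Int Int)).items
      = (pvR cards).map (fun k => (k, (pvCnt cards k : Int))) := by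
  have hk := pv_keysCount cards
  have hnd : (cards.foldl (fun d c => d.modify (pvRankVal c) 0 (fun n => n + 1)) (PySem.Dict.empty : PySem.Dict Int Int)).keys.Nodup := by
    rw [hk]; exact pv_nodupR cards
  calc (cards.foldl (fun d c => d.modify (pvRankVal c) 0 (fun n => n + 1)) (PySem.Dict.empty : PySem.Dict Int Int)).items
      = (cards.foldl (fun d c => d.modify (pvRankVal c) 0 (fun n => n + 1)) (PySem.Dict.empty : PySem.Dict Int Int)).keys.map
          (fun k => (k, (cards.foldl (fun d c => d.modify (pvRankVal c) 0 (fun n => n + 1)) (PySem.Dict.empty : PySem.Dict Int Int)).getD k 0)) :=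
        PySem.Dict.items_eq_map_keys _ hnd 0
    _ = (pvR cards).map (fun k => (k, (pvCnt cards k : Int))) := by
        rw [hk]
        exact List.map_congr_left (fun k _ => by rw [pv_countD])

theorem pv_pairlistA (cards : List String) :
    (((cards.foldl (fun d c => d.modify (pvRankVal c) [] (fun v => v ++ [c])) PySem.Dict.empty).items.filter
        (fun p => decide (2 ≤ p.2.length))).map (fun p => p.1)) = pvK cards := by
  rw [pv_itemsGroup, List.filter_map, List.map_map]
  have : ((fun p : Int × List String => decide (2 ≤ p.2.length)) ∘ fun k => (k, pvFilt cards k))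
      = fun k => decide (2 ≤ pvCnt cards k) := by
    funext k; simp [Function.comp, pv_lenFilt]
  rw [this]
  have h2 : ((fun p : Int × List String => p.1) ∘ fun k => (k, pvFilt cards k)) = id := rfl
  rw [h2, List.map_id, pvK]

theorem pv_hiloB (cards : List String) :
    ((cards.foldl (fun d c => d.modify (pvRankVal c) 0 (fun n => n + 1)) (PySem.Dict.empty : PySem.Dict Int Int)).items.foldl
        (fun p rn => if 2 ≤ rn.2 then pvTop2 p rn.1 else p) (none, none))
      = (pvK cards).foldl pvTop2 (none, none) := by
  rw [pv_itemsCount]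
  rw [List.foldl_map]
  rw [PySem.List.foldl_ite_eq_foldl_filter (p := fun k => 2 ≤ (pvCnt cards k : Int)) pvTop2]
  have : (fun k => decide (2 ≤ (pvCnt cards k : Int))) = fun k => decide (2 ≤ pvCnt cards k) := by
    funext k; simp
  rw [this, pvK]

theorem pv_two_of_le (l : List String) (h : 2 ≤ l.length) : ∃ a b t, l = a :: b :: t := by
  match l, h with
  | a :: b :: t, _ => exact ⟨a, b, t, rfl⟩

theorem pv_kick_nonempty (cards : List String) (a b : Int)
    (hpre : ¬((pvR cards).length = 2 ∧ ∀ r ∈ pvR cards, 2 ≤ (cards.map pvRankVal).count r))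
    (ha : a ∈ pvK cards) (hb : b ∈ pvK cards) (hab : a ≠ b) :
    cards.filter (fun c => !(pvRankVal c == a || pvRankVal c == b)) ≠ [] := by
  intro hnil
  apply hpre
  have hall : ∀ c ∈ cards, pvRankVal c = a ∨ pvRankVal c = b := by
    intro c hc
    have := List.filter_eq_nil_iff.mp hnil c hc
    simp at this
    tauto
  have haR : a ∈ pvR cards := (List.mem_filter.mp ha).1
  have hbR : b ∈ pvR cards := (List.mem_filter.mp hb).1
  have hsub : pvR cards ⊆ [a, b] := by
    intro r hr
    have hr' : r ∈ cards.map pvRankVal := (PySem.List.mem_dedup _ _).mp hr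
    obtain ⟨c, hc, hrc⟩ := List.mem_map.mp hr'
    rcases hall c hc with h | h <;> simp [← hrc, h]
  have hsub2 : [a, b] ⊆ pvR cards := by
    intro r hr
    rcases List.mem_pair.mp hr with h | h <;> simp [h, haR, hbR]
  have hnd := pv_nodupR cards
  have hlen1 : (pvR cards).length ≤ 2 := by
    simpa using List.Subperm.length_le (List.subperm_of_subset hnd hsub)
  have hlen2 : 2 ≤ (pvR cards).length := by
    simpa using List.Subperm.length_le (List.subperm_of_subset (by simp [hab] : ([a, b] : List Int).Nodup) hsub2)
  refine ⟨by omega, ?_⟩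
  intro r hr
  rcases List.mem_pair.mp (hsub hr) with h | h
  · subst h; simpa [pvCnt] using (of_decide_eq_true (List.mem_filter.mp ha).2)
  · subst h; simpa [pvCnt] using (of_decide_eq_true (List.mem_filter.mp hb).2)

theorem pv_loopB (cards : List String) (hi lo : Int) (hab : hi ≠ lo) :
    cards.foldl (fun s c =>
        let r := pvRankVal c
        if r == hi then (pvFill2 s.1 c, s.2.1, s.2.2)
        else if r == lo then (s.1, pvFill2 s.2.1 c, s.2.2)
        else match s.2.2 with
          | none => (s.1, s.2.1, some c)
          | some k => if pvRankVal k < r then (s.1, s.2.1, some c) else (s.1, s.2.1, some k))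
      (((none, none), (none, none), none) : (Option String × Option String) × (Option String × Option String) × Option String)
    = ((pvFilt cards hi).foldl pvFill2 (none, none),
       (pvFilt cards lo).foldl pvFill2 (none, none),
       (cards.filter (fun c => !(pvRankVal c == hi || pvRankVal c == lo))).foldl pvKickStep none) := by
  have hstep : (fun (s : (Option String × Option String) × (Option String × Option String) × Option String) c =>
        let r := pvRankVal c
        if r == hi then (pvFill2 s.1 c, s.2.1, s.2.2)
        else if r == lo then (s.1, pvFill2 s.2.1 c, s.2.2)
        else match s.2.2 with
          | none => (s.1, s.2.1, some c)
          | some k => if pvRankVal k < r then (s.1, s.2.1, some c) else (s.1, s.2.1, some k))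
      = (fun s c => ((fun s1 c => if pvRankVal c == hi then pvFill2 s1 c else s1) s.1 c,
          (fun (q : (Option String × Option String) × Option String) c =>
            ((fun s2 c => if pvRankVal c == hi then s2 else if pvRankVal c == lo then pvFill2 s2 c else s2) q.1 c,
             (fun k c => if pvRankVal c == hi then k else if pvRankVal c == lo then k else pvKickStep k c) q.2 c)) s.2 c)) := by
    funext s c
    rcases s with ⟨s1, s2, k⟩
    simp only []
    by_cases h1 : pvRankVal c == hi <;> by_cases h2 : pvRankVal c == lo <;>
      cases k <;> simp [h1, h2, pvKickStep] <;> try (split_ifs <;> rfl)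
  rw [hstep,
    PySem.List.foldl_prod_mk
      (f := fun s1 c => if pvRankVal c == hi then pvFill2 s1 c else s1)
      (g := fun (q : (Option String × Option String) × Option String) c =>
        ((fun s2 c => if pvRankVal c == hi then s2 else if pvRankVal c == lo then pvFill2 s2 c else s2) q.1 c,
         (fun k c => if pvRankVal c == hi then k else if pvRankVal c == lo then k else pvKickStep k c) q.2 c)),
    PySem.List.foldl_prod_mk
      (f := fun s2 c => if pvRankVal c == hi then s2 else if pvRankVal c == lo then pvFill2 s2 c else s2)
      (g := fun k c => if pvRankVal c == hi then k else if pvRankVal c == lo then k else pvKickStep k c)]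
  congr 1
  · rw [PySem.List.foldl_if_eq_foldl_filter]; rfl
  congr 1
  · rw [show (fun (s2 : Option String × Option String) c =>
          if pvRankVal c == hi then s2 else if pvRankVal c == lo then pvFill2 s2 c else s2)
        = fun s2 c => if pvRankVal c == lo then pvFill2 s2 c else s2 by
      funext s2 c
      by_cases h2 : pvRankVal c == lo
      · have h1 : (pvRankVal c == hi) = false := by
          simp at h2 ⊢; omega
        simp [h1, h2]
      · simp [h2]]
    rw [PySem.List.foldl_if_eq_foldl_filter]; rfl
  · rw [show (fun (k : Option String) c =>
          if pvRankVal c == hi then k else if pvRankVal c == lo then k else pvKickStep k c)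
        = fun k c => if (!(pvRankVal c == hi || pvRankVal c == lo)) then pvKickStep k c else k by
      funext k c
      by_cases h1 : pvRankVal c == hi <;> by_cases h2 : pvRankVal c == lo <;> simp [h1, h2]]
    rw [PySem.List.foldl_if_eq_foldl_filter]

theorem pv_main (cards : List String) (hpre : Pre_find_two_pair_cards_py cards) :
    find_two_pair_cards_py cards = find_two_pair_cards_py_alt cards := by
  unfold find_two_pair_cards_py find_two_pair_cards_py_alt
  simp only [pv_pairlistA, pv_hiloB, pv_groupD]
  rw [pv_top2_perm]
  have hKnd : (pvK cards).Nodup := (pv_nodupR cards).filter _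
  cases hs : PySem.List.sorted (pvK cards) (fun x => x) true with
  | nil => simp
  | cons a tl =>
    cases tl with
    | nil => simp [pvTop2]
    | cons b rest =>
      have hnds : (a :: b :: rest).Nodup := hs ▸ ((PySem.List.sorted_perm (pvK cards) (fun x => x) true).symm.nodup hKnd)
      have hab : a ≠ b := fun h => (List.nodup_cons.mp hnds).1 (h ▸ List.mem_cons_self ..)
      have haK : a ∈ pvK cards := (PySem.List.mem_sorted _ _ _ _).mp (hs ▸ List.mem_cons_self ..)
      have hbK : b ∈ pvK cards := (PySem.List.mem_sorted _ _ _ _).mp (hs ▸ (by simp : b ∈ a :: b :: rest))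
      have hca : 2 ≤ (pvFilt cards a).length := by
        rw [pv_lenFilt]
        exact of_decide_eq_true (List.mem_filter.mp haK).2
      have hcb : 2 ≤ (pvFilt cards b).length := by
        rw [pv_lenFilt]
        exact of_decide_eq_true (List.mem_filter.mp hbK).2
      obtain ⟨c1, c2, t1, hfa⟩ := pv_two_of_le _ hca
      obtain ⟨d1, d2, t2, hfb⟩ := pv_two_of_le _ hcb
      have hKK := pv_kick_nonempty cards a b hpre.2 haK hbK hab
      obtain ⟨k0, kt, hks⟩ : ∃ k0 kt,
          PySem.List.sorted (cards.filter (fun c => !(pvRankVal c == a || pvRankVal c == b))) pvRankVal true = k0 :: kt := by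
        cases hk : PySem.List.sorted (cards.filter (fun c => !(pvRankVal c == a || pvRankVal c == b))) pvRankVal true with
        | nil => exact absurd ((PySem.List.sorted_eq_nil_iff _ _ _).mp hk) hKK
        | cons k0 kt => exact ⟨k0, kt, rfl⟩
      have hpw2 : (a :: b :: rest).Pairwise (fun x y => y ≤ x) := by
        have h := PySem.List.sorted_pairwise_rev (pvK cards) (fun x => x)
        rw [hs] at h
        simpa using h
      rw [pvTop2_pair a b rest hpw2]
      simp only []
      rw [hfa, hfb, hks]
      simp only [List.take]
      rw [pv_loopB cards a b hab, hfa, hfb, pvFill2_two, pvFill2_two]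
      have hkick : (cards.filter (fun c => !(pvRankVal c == a || pvRankVal c == b))).foldl pvKickStep none = some k0 := by
        rw [← pv_sortedHead, hks]
        rfl
      rw [hkick]

-- ===== VERDICT =====
theorem find_two_pair_cards_py_spec : Claim_equal_find_two_pair_cards_py := by
  intro cards _ hpre
  exact pv_main cards hpre
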